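-- pv_equiv track=rewrite | github.com/tam-km-truong/workspace_quasibiclique | rumen_experimentations/001_original_script/quasi_clique_comb.py | get_submatrices
-- ===== SOURCE A (Python) =====
-- def get_submatrices(rows_data, cols_data, edges, rows_res, cols_res):
--     """
--     Computes submatrices M1 and M2 from the original matrix M.
--
--     Arguments:
--     ----------
--     rows_data: list of tuples (row, degree) of rows in the matrix.
--     cols_data: list of tuples (col, degree) of columns in the matrix.
--     edges: list of tuples (row, col) corresponding to the ones of the matrix.
--     rows_res: list of row indices or list of tuples (row, degree).
--     cols_res: list of column indices or list of tuples (col, degree).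
--
--     Returns:
--     --------
--     (rows_M1, cols_M1, edges_M1), (rows_M2, cols_M2, edges_M2)
--     """
--
--     # Extract only indices if tuples are given
--     rows_res_set = {row if isinstance(row, int) else row[0] for row in rows_res}
--     cols_res_set = {col if isinstance(col, int) else col[0] for col in cols_res}
--
--     # Compute M1 (Excludes selected rows)
--     rows_M1 = [(row, deg) for row, deg in rows_data if row not in rows_res_set]
--     edges_M1 = [(r, c) for r, c in edges if r not in rows_res_set]
--     cols_M1 = [(col, sum(1 for r, c in edges_M1 if c == col)) for col, _ in cols_data]
--
--     # Compute M2 (Excludes selected columns)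
--     cols_M2 = [(col, deg) for col, deg in cols_data if col not in cols_res_set]
--     edges_M2 = [(r, c) for r, c in edges if c not in cols_res_set]
--     rows_M2 = [(row, sum(1 for r, c in edges_M2 if r == row)) for row, _ in rows_data]
--
--     return (rows_M1, cols_M1, edges_M1), (rows_M2, cols_M2, edges_M2)
-- ===== SOURCE B (Python) =====
-- def get_submatrices(rows_data, cols_data, edges, rows_res, cols_res):
--     """One pass over edges: split into the two surviving edge lists while
--     counting degree per column / per row in dicts; then a lookup per col/row
--     instead of a scan of the edge list for each."""
--     rset = {row if isinstance(row, int) else row[0] for row in rows_res}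
--     cset = {col if isinstance(col, int) else col[0] for col in cols_res}
--     edges_M1, edges_M2 = [], []
--     col_deg, row_deg = {}, {}
--     for r, c in edges:
--         if r not in rset:
--             edges_M1.append((r, c))
--             col_deg[c] = col_deg.get(c, 0) + 1
--         if c not in cset:
--             edges_M2.append((r, c))
--             row_deg[r] = row_deg.get(r, 0) + 1
--     rows_M1 = [(r, d) for r, d in rows_data if r not in rset]
--     cols_M1 = [(c, col_deg.get(c, 0)) for c, _ in cols_data]
--     cols_M2 = [(c, d) for c, d in cols_data if c not in cset]
--     rows_M2 = [(r, row_deg.get(r, 0)) for r, _ in rows_data]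
--     return (rows_M1, cols_M1, edges_M1), (rows_M2, cols_M2, edges_M2)
-- ===== Notes on version B (the rewrite author's own statement) =====
-- stated objective: alternative
-- what changed: Replaces the per-column and per-row scans over the filtered edge lists by one pass over edges that builds degree dicts, then a single dict lookup per column/row; on the measured inputs this was not measurably faster, so no speed is claimed.
import Mathlib
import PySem

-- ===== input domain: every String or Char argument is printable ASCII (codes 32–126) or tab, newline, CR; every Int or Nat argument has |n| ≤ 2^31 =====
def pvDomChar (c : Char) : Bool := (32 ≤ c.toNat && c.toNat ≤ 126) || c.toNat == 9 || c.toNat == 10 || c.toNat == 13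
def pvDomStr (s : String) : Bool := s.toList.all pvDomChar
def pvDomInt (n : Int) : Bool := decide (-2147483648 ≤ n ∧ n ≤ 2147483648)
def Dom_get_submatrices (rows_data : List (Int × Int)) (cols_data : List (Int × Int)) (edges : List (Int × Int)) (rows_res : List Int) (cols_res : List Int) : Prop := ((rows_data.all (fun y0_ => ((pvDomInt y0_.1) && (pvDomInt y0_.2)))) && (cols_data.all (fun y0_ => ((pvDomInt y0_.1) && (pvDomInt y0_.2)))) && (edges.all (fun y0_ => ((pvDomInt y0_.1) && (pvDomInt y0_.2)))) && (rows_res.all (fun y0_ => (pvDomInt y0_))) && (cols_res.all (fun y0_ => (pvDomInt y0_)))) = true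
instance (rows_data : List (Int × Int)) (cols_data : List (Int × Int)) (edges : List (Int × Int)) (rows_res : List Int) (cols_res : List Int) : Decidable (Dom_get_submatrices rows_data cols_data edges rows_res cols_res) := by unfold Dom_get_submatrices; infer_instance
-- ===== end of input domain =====

-- ===== PORT A =====
-- B changes: one pass over edges builds per-column/per-row degree dicts, replacing A's per-column/per-row scans of the filtered edge lists (objective: alternative).
def get_submatrices (rows_data : List (Int × Int)) (cols_data : List (Int × Int)) (edges : List (Int × Int)) (rows_res : List Int) (cols_res : List Int) : ((List (Int × Int)) × (List (Int × Int)) × (List (Int × Int))) × ((List (Int × Int)) × (List (Int × Int)) × (List (Int × Int))) :=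
  -- rows_res/cols_res are lists of ints here, so the isinstance branch always takes the int itself
  let rows_res_set : PySem.Set Int := PySem.Set.ofList rows_res
  let cols_res_set : PySem.Set Int := PySem.Set.ofList cols_res
  let rows_M1 := rows_data.filter (fun p => !(PySem.Set.contains rows_res_set p.1))
  let edges_M1 := edges.filter (fun p => !(PySem.Set.contains rows_res_set p.1))
  -- sum(1 for r, c in edges_M1 if c == col)
  let cols_M1 := cols_data.map (fun p => (p.1, edges_M1.foldl (fun acc q => if q.2 == p.1 then acc + 1 else acc) (0 : Int)))
  let cols_M2 := cols_data.filter (fun p => !(PySem.Set.contains cols_res_set p.1))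
  let edges_M2 := edges.filter (fun p => !(PySem.Set.contains cols_res_set p.2))
  let rows_M2 := rows_data.map (fun p => (p.1, edges_M2.foldl (fun acc q => if q.1 == p.1 then acc + 1 else acc) (0 : Int)))
  ((rows_M1, cols_M1, edges_M1), (rows_M2, cols_M2, edges_M2))

-- ===== PORT B =====
-- state of Source B's single loop, split as ((edges_M1, col_deg), (edges_M2, row_deg));
-- the two if-blocks of the loop body touch disjoint halves of the state
def pvStepR (rset : PySem.Set Int) (st : List (Int × Int) × PySem.Dict Int Int) (e : Int × Int) :
    List (Int × Int) × PySem.Dict Int Int :=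
  if !(PySem.Set.contains rset e.1)
    then (st.1 ++ [e], st.2.insert e.2 (st.2.getD e.2 0 + 1))
    else st

def pvStepC (cset : PySem.Set Int) (st : List (Int × Int) × PySem.Dict Int Int) (e : Int × Int) :
    List (Int × Int) × PySem.Dict Int Int :=
  if !(PySem.Set.contains cset e.2)
    then (st.1 ++ [e], st.2.insert e.1 (st.2.getD e.1 0 + 1))
    else st

def get_submatrices_alt (rows_data : List (Int × Int)) (cols_data : List (Int × Int)) (edges : List (Int × Int)) (rows_res : List Int) (cols_res : List Int) : ((List (Int × Int)) × (List (Int × Int)) × (List (Int × Int))) × ((List (Int × Int)) × (List (Int × Int)) × (List (Int × Int))) :=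
  let rset : PySem.Set Int := PySem.Set.ofList rows_res
  let cset : PySem.Set Int := PySem.Set.ofList cols_res
  let st := edges.foldl (fun st e => (pvStepR rset st.1 e, pvStepC cset st.2 e))
    (([], PySem.Dict.empty), ([], PySem.Dict.empty))
  let rows_M1 := rows_data.filter (fun p => !(PySem.Set.contains rset p.1))
  let cols_M1 := cols_data.map (fun p => (p.1, st.1.2.getD p.1 0))
  let cols_M2 := cols_data.filter (fun p => !(PySem.Set.contains cset p.1))
  let rows_M2 := rows_data.map (fun p => (p.1, st.2.2.getD p.1 0))
  ((rows_M1, cols_M1, st.1.1), (rows_M2, cols_M2, st.2.1))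

-- ===== PRECONDITION & SPEC =====
def Spec_get_submatrices (rows_data : List (Int × Int)) (cols_data : List (Int × Int)) (edges : List (Int × Int)) (rows_res : List Int) (cols_res : List Int) (out : ((List (Int × Int)) × (List (Int × Int)) × (List (Int × Int))) × ((List (Int × Int)) × (List (Int × Int)) × (List (Int × Int)))) : Prop := out = get_submatrices_alt rows_data cols_data edges rows_res cols_res
instance (rows_data : List (Int × Int)) (cols_data : List (Int × Int)) (edges : List (Int × Int)) (rows_res : List Int) (cols_res : List Int) (out : ((List (Int × Int)) × (List (Int × Int)) × (List (Int × Int))) × ((List (Int × Int)) × (List (Int × Int)) × (List (Int × Int)))) : Decidable (Spec_get_submatrices rows_data cols_data edges rows_res cols_res out) := by unfold Spec_get_submatrices; infer_instance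

-- ===== CLAIM (what is proved, stated in full; the proofs are below) =====
def Claim_equal_get_submatrices : Prop := ∀ (rows_data : List (Int × Int)) (cols_data : List (Int × Int)) (edges : List (Int × Int)) (rows_res : List Int) (cols_res : List Int), Dom_get_submatrices rows_data cols_data edges rows_res cols_res → Spec_get_submatrices rows_data cols_data edges rows_res cols_res (get_submatrices rows_data cols_data edges rows_res cols_res)

-- ===== LEMMAS AND PROOFS =====

theorem foldl_prod_split {α β γ : Type} (f : α → γ → α) (g : β → γ → β)
    (l : List γ) (a : α) (b : β) :
    l.foldl (fun st e => (f st.1 e, g st.2 e)) (a, b) = (l.foldl f a, l.foldl g b) := by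
  induction l generalizing a b with
  | nil => rfl
  | cons x xs ih => simp [ih]

theorem pvStepR_foldl (rset : PySem.Set Int) (edges : List (Int × Int))
    (acc : List (Int × Int)) (d : PySem.Dict Int Int) :
    edges.foldl (pvStepR rset) (acc, d) =
      (acc ++ edges.filter (fun p => !(PySem.Set.contains rset p.1)),
       ((edges.filter (fun p => !(PySem.Set.contains rset p.1))).map (·.2)).foldl
         (fun d x => d.insert x (d.getD x 0 + 1)) d) := by
  induction edges generalizing acc d with
  | nil => simp
  | cons e es ih =>
    simp only [List.foldl_cons, pvStepR, List.filter_cons]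
    by_cases h : e.1 ∈ rset <;> simp [h, ih]

theorem pvStepC_foldl (cset : PySem.Set Int) (edges : List (Int × Int))
    (acc : List (Int × Int)) (d : PySem.Dict Int Int) :
    edges.foldl (pvStepC cset) (acc, d) =
      (acc ++ edges.filter (fun p => !(PySem.Set.contains cset p.2)),
       ((edges.filter (fun p => !(PySem.Set.contains cset p.2))).map (·.1)).foldl
         (fun d x => d.insert x (d.getD x 0 + 1)) d) := by
  induction edges generalizing acc d with
  | nil => simp
  | cons e es ih =>
    simp only [List.foldl_cons, pvStepC, List.filter_cons]
    by_cases h : e.2 ∈ cset <;> simp [h, ih]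

theorem count_map_countP (f : Int × Int → Int) (l : List (Int × Int)) (v : Int) :
    (l.map f).count v = l.countP (fun q => f q == v) := by
  simp [List.count, List.countP_map, Function.comp_def]

-- ===== VERDICT (by name: the statement is the Claim_ definition above) =====
theorem get_submatrices_spec : Claim_equal_get_submatrices := by
  intro rows_data cols_data edges rows_res cols_res _
  unfold Spec_get_submatrices get_submatrices get_submatrices_alt
  simp only [foldl_prod_split, pvStepR_foldl, pvStepC_foldl, List.nil_append]
  refine congrArg₂ _ (congrArg₂ _ rfl (congrArg₂ _ ?_ rfl)) (congrArg₂ _ ?_ rfl) <;>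
    refine List.map_congr_left (fun p _ => ?_) <;>
    rw [PySem.List.foldl_if_add_one, PySem.Dict.getD_foldl_insert_add_one, count_map_countP] <;>
    simp [PySem.Dict.getD, PySem.Dict.get?, PySem.Dict.empty]
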